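-- pv_equiv track=rewrite | github.com/andrewkwatts-maker/periodica | src/periodica/utils/bonding_rules.py | get_formula
-- ===== SOURCE A (Python) =====
-- from typing import Dict, List, Optional, Tuple
--
-- def get_formula(composition: Dict[str, int]) -> str:
--     """
--     Generate molecular formula using Hill system:
--     C first, H second, then alphabetical.
--     """
--     parts = []
--
--     # Hill system ordering
--     if 'C' in composition:
--         count = composition['C']
--         parts.append(f"C{count}" if count > 1 else "C")
--         if 'H' in composition:
--             count = composition['H']
--             parts.append(f"H{count}" if count > 1 else "H")
--
--     for symbol in sorted(composition.keys()):
--         if symbol in ('C', 'H') and 'C' in composition: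
--             continue
--         count = composition[symbol]
--         parts.append(f"{symbol}{count}" if count > 1 else symbol)
--
--     return ''.join(parts)
-- ===== SOURCE B (Python) =====
-- def get_formula(composition):
--     remaining = set(composition)
--     has_c = 'C' in remaining
--     parts = []
--     while remaining:
--         if has_c and 'C' in remaining:
--             sym = 'C'
--         elif has_c and 'H' in remaining:
--             sym = 'H'
--         else:
--             sym = min(remaining)
--         remaining.remove(sym)
--         count = composition[sym]
--         parts.append(f"{sym}{count}" if count > 1 else sym)
--     return ''.join(parts)
-- ===== Notes on version B (the rewrite author's own statement) =====
-- stated objective: alternative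
-- what changed: Replaces A's sort-then-scan (sorted key list, C/H prefix block, filtered alphabetical pass) with a selection loop over a shrinking set of remaining symbols: each iteration picks C, then H (when carbon is present), then min(remaining), removes it and emits its part.
import Mathlib
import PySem

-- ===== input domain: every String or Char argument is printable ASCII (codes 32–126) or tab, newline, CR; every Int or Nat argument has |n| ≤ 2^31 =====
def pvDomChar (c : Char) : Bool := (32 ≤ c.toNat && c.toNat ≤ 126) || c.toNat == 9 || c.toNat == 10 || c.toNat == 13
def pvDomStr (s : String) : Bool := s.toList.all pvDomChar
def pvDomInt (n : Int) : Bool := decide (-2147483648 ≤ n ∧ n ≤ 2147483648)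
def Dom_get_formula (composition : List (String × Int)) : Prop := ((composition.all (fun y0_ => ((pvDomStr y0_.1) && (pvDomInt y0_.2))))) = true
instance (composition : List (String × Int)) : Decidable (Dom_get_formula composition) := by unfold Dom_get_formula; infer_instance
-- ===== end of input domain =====

-- B replaces A's sort-then-scan with a selection loop: while symbols remain, emit C, then H
-- (when carbon is present), then repeatedly the minimum remaining symbol (alternative; same result).
-- The dict parameter is the association list of the Python dict: distinct keys in insertion order; lookup is first match.
def pvContains (composition : List (String × Int)) (s : String) : Bool :=
  composition.any (fun p => p.1 == s)

def pvLookup (composition : List (String × Int)) (s : String) : Int :=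
  (((composition.find? (fun p => p.1 == s)).map Prod.snd).getD 0)

-- ===== PORT A =====
def get_formula (composition : List (String × Int)) : String :=
  let parts : List String :=
    if pvContains composition "C" then
      let c := pvLookup composition "C"
      let parts := [if c > 1 then "C" ++ PySem.Int.toStr c else "C"]
      if pvContains composition "H" then
        let h := pvLookup composition "H"
        parts ++ [if h > 1 then "H" ++ PySem.Int.toStr h else "H"]
      else parts
    else []
  let parts :=
    (PySem.List.sorted (PySem.List.dedup (composition.map Prod.fst)) (fun s => s) false).foldl
      (fun acc symbol =>
        if (symbol == "C" || symbol == "H") && pvContains composition "C" then acc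
        else
          let c := pvLookup composition symbol
          acc ++ [if c > 1 then symbol ++ PySem.Int.toStr c else symbol]) parts
  PySem.Str.join "" parts

-- ===== PORT B =====
-- f"{sym}{count}" if count > 1 else sym
def pvFmt (composition : List (String × Int)) (sym : String) : String :=
  let count := pvLookup composition sym
  if count > 1 then sym ++ PySem.Int.toStr count else sym

-- min(remaining) of a nonempty collection is the running-min fold (termination lemma for pvLoop)
theorem pvFoldlMin_mem (x : String) (xs : List String) : xs.foldl min x ∈ x :: xs := by
  induction xs generalizing x with
  | nil => simp
  | cons y ys ih =>
    simp only [List.foldl_cons]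
    rcases List.mem_cons.mp (ih (min x y)) with h | h
    · rcases min_choice x y with h2 | h2 <;> rw [h2] at h ⊢ <;> simp [h]
    · simp [h]

-- the branch choosing the next symbol: C / H (when carbon present) / min(remaining)
def pvPick (hasC : Bool) (x : String) (xs : List String) : String :=
  if hasC && (x :: xs).contains "C" then "C"
  else if hasC && (x :: xs).contains "H" then "H"
  else xs.foldl min x

theorem pvPick_mem (hasC : Bool) (x : String) (xs : List String) : pvPick hasC x xs ∈ x :: xs := by
  unfold pvPick
  split_ifs with h1 h2
  · exact List.contains_iff_mem.mp (Bool.and_eq_true _ _ ▸ h1).2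
  · exact List.contains_iff_mem.mp (Bool.and_eq_true _ _ ▸ h2).2
  · exact pvFoldlMin_mem x xs

-- the while-loop of Source B: pick C / H / min(remaining), remove it, append its formatted part
def pvLoop (composition : List (String × Int)) (hasC : Bool) : List String → List String
  | [] => []
  | x :: xs =>
    pvFmt composition (pvPick hasC x xs)
      :: pvLoop composition hasC ((x :: xs).erase (pvPick hasC x xs))
  termination_by r => r.length
  decreasing_by
    rw [List.length_erase_of_mem (pvPick_mem hasC x xs)]
    simp

def get_formula_alt (composition : List (String × Int)) : String :=
  let remaining := PySem.Set.ofList (composition.map Prod.fst)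
  let hasC := remaining.contains "C"
  PySem.Str.join "" (pvLoop composition hasC remaining)

-- ===== PRECONDITION & SPEC =====
def Spec_get_formula (composition : List (String × Int)) (out : String) : Prop := out = get_formula_alt composition
instance (composition : List (String × Int)) (out : String) : Decidable (Spec_get_formula composition out) := by unfold Spec_get_formula; infer_instance

-- ===== CLAIM (what is proved, stated in full; the proofs are below) =====
def Claim_equal_get_formula : Prop := ∀ (composition : List (String × Int)), Dom_get_formula composition → Spec_get_formula composition (get_formula composition)

-- ===== LEMMAS AND PROOFS =====

theorem pvFoldlMin_le (x : String) (xs : List String) : ∀ z ∈ x :: xs, xs.foldl min x ≤ z := by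
  induction xs generalizing x with
  | nil => intro z hz; simp only [List.mem_cons, List.not_mem_nil, or_false] at hz; simp [hz]
  | cons y ys ih =>
    intro z hz
    simp only [List.foldl_cons]
    rcases List.mem_cons.mp hz with rfl | hz2
    · exact le_trans (ih (min z y) (min z y) List.mem_cons_self) (min_le_left z y)
    · rcases List.mem_cons.mp hz2 with rfl | hz3
      · exact le_trans (ih (min x z) (min x z) List.mem_cons_self) (min_le_right x z)
      · exact ih (min x y) z (List.mem_cons_of_mem _ hz3)

-- the order in which Source B's else-branch (no C/H special case applies) emits symbols
def pvMin (x : String) (xs : List String) : String := xs.foldl min x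

def selSort : List String → List String
  | [] => []
  | x :: xs => pvMin x xs :: selSort ((x :: xs).erase (pvMin x xs))
  termination_by r => r.length
  decreasing_by
    rw [List.length_erase_of_mem (show pvMin x xs ∈ x :: xs from pvFoldlMin_mem x xs)]
    simp

theorem pvMin_mem (x : String) (xs : List String) : pvMin x xs ∈ x :: xs :=
  pvFoldlMin_mem x xs

theorem pvMin_le (x : String) (xs : List String) : ∀ z ∈ x :: xs, pvMin x xs ≤ z :=
  pvFoldlMin_le x xs

theorem selSort_perm (l : List String) : (selSort l).Perm l := by
  induction l using selSort.induct with
  | case1 => simp [selSort]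
  | case2 x xs ih =>
    rw [selSort]
    exact ((ih.cons _).trans (List.perm_cons_erase (pvMin_mem x xs)).symm)

theorem selSort_pairwise (l : List String) (h : l.Nodup) : (selSort l).Pairwise (· < ·) := by
  induction l using selSort.induct with
  | case1 => simp [selSort]
  | case2 x xs ih =>
    rw [selSort]
    refine List.pairwise_cons.mpr ⟨?_, ih (h.erase _)⟩
    intro b hb
    have hb' : b ∈ (x :: xs).erase (pvMin x xs) := (selSort_perm _).mem_iff.mp hb
    have hbne : b ≠ pvMin x xs := by
      rintro rfl
      exact h.not_mem_erase hb'
    have hble : pvMin x xs ≤ b := pvMin_le x xs b (List.mem_of_mem_erase hb')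
    exact lt_of_le_of_ne hble (Ne.symm hbne)

theorem selSort_eq_sorted (l : List String) (h : l.Nodup) :
    PySem.List.sorted l (fun s => s) false = selSort l :=
  PySem.List.sorted_eq_of_perm_of_pairwise_lt l (selSort l) (fun s => s) (selSort_perm l)
    (selSort_pairwise l h)

-- when no special branch can fire, the loop is selection-sort emission
theorem pvLoop_plain (composition : List (String × Int)) (hasC : Bool) (r : List String)
    (h : hasC = false ∨ ("C" ∉ r ∧ "H" ∉ r)) :
    pvLoop composition hasC r = (selSort r).map (pvFmt composition) := by
  induction r using selSort.induct with
  | case1 => simp [pvLoop, selSort]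
  | case2 x xs ih =>
    have hcond1 : (hasC && (x :: xs).contains "C") = false := by
      rcases h with rfl | ⟨hC, _⟩
      · simp
      · simp [hC]
    have hcond2 : (hasC && (x :: xs).contains "H") = false := by
      rcases h with rfl | ⟨_, hH⟩
      · simp
      · simp [hH]
    have hpick : pvPick hasC x xs = pvMin x xs := by
      rw [pvPick, hcond1, hcond2, pvMin]
      simp
    rw [pvLoop, selSort, hpick]
    simp only [List.map_cons]
    refine congrArg _ (ih ?_)
    rcases h with rfl | ⟨hC, hH⟩
    · exact Or.inl rfl
    · exact Or.inr ⟨fun hc => hC (List.mem_of_mem_erase hc), fun hh => hH (List.mem_of_mem_erase hh)⟩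

theorem foldl_skip {α β : Type} (l : List α) (q : α → Bool) (f : α → β) (acc : List β) :
    l.foldl (fun acc x => if q x then acc else acc ++ [f x]) acc
      = acc ++ (l.filter (fun x => !q x)).map f := by
  have h : (fun (acc : List β) x => if q x then acc else acc ++ [f x])
      = (fun acc x => if (!q x) then acc ++ [f x] else acc) := by
    funext a x
    cases q x <;> simp
  rw [h, PySem.List.foldl_append_if]

-- the sorted tail after removing C and H equals the filtered sorted list
theorem erase_filter_sorted (keys : List String) (hnd : keys.Nodup)
    (hpw : (PySem.List.sorted keys (fun s => s) false).Pairwise (· < ·)) :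
    PySem.List.sorted ((keys.erase "C").erase "H") (fun s => s) false
      = (PySem.List.sorted keys (fun s => s) false).filter (fun s => !(s == "C" || s == "H")) := by
  have h1 : (keys.erase "C").erase "H"
      = keys.filter (fun s => !(s == "C" || s == "H")) := by
    rw [hnd.erase_eq_filter, (hnd.filter _).erase_eq_filter, List.filter_filter]
    refine List.filter_congr ?_
    intro a _
    by_cases hC : a = "C" <;> by_cases hH : a = "H" <;> simp [hC, hH, bne, Bool.and_comm]
  apply PySem.List.sorted_eq_of_perm_of_pairwise_lt
  · rw [h1]
    exact (PySem.List.sorted_perm keys (fun s => s) false).filter _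
  · exact hpw.filter _

-- one unfolding of the while-loop when carbon is present: C first, then H if present, then plain selection
theorem pvLoop_hasC (composition : List (String × Int)) (r : List String)
    (hnd : r.Nodup) (hC : "C" ∈ r) :
    pvLoop composition true r
      = pvFmt composition "C" ::
        (if "H" ∈ r then
          pvFmt composition "H" :: (selSort ((r.erase "C").erase "H")).map (pvFmt composition)
         else (selSort (r.erase "C")).map (pvFmt composition)) := by
  cases r with
  | nil => cases hC
  | cons x xs =>
    have hpick1 : pvPick true x xs = "C" := by
      rw [pvPick]
      simp [hC]
    rw [pvLoop, hpick1]
    refine congrArg _ ?_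
    by_cases hH : "H" ∈ (x :: xs)
    · rw [if_pos hH]
      have hHe : "H" ∈ (x :: xs).erase "C" := (List.mem_erase_of_ne (by decide)).mpr hH
      have hCne : "C" ∉ (x :: xs).erase "C" := hnd.not_mem_erase
      cases he : (x :: xs).erase "C" with
      | nil => rw [he] at hHe; cases hHe
      | cons y ys =>
        rw [he] at hHe hCne
        have hpick2 : pvPick true y ys = "H" := by
          rw [pvPick]
          have h1 : (y :: ys).contains "C" = false := by
            rw [Bool.eq_false_iff]
            intro hcc
            exact hCne (List.contains_iff_mem.mp hcc)
          have h2 : (y :: ys).contains "H" = true := List.contains_iff_mem.mpr hHe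
          rw [h1, h2]
          simp
        rw [pvLoop, hpick2]
        refine congrArg _ ?_
        have hnd2 : (y :: ys).Nodup := he ▸ hnd.erase "C"
        refine pvLoop_plain composition true _ (Or.inr ⟨?_, hnd2.not_mem_erase⟩)
        intro hcc
        exact hCne (List.mem_of_mem_erase hcc)
    · rw [if_neg hH]
      refine pvLoop_plain composition true _ (Or.inr ⟨hnd.not_mem_erase, ?_⟩)
      intro hhh
      exact hH (List.mem_of_mem_erase hhh)

theorem main_eq (composition : List (String × Int)) :
    get_formula composition = get_formula_alt composition := by
  have hNd : (PySem.Set.ofList (composition.map Prod.fst)).Nodup :=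
    PySem.Set.nodup_ofList _
  have hCiff : (pvContains composition "C" = true)
      ↔ "C" ∈ PySem.Set.ofList (composition.map Prod.fst) := by
    simp [pvContains, List.any_eq_true, PySem.Set.mem_ofList, List.mem_map]
  have hHiff : (pvContains composition "H" = true)
      ↔ "H" ∈ PySem.Set.ofList (composition.map Prod.fst) := by
    simp [pvContains, List.any_eq_true, PySem.Set.mem_ofList, List.mem_map]
  have hfmt : pvFmt composition = fun x =>
      if 1 < pvLookup composition x then x ++ PySem.Int.toStr (pvLookup composition x) else x := by
    funext s
    simp [pvFmt]
  have hpw : (PySem.List.sorted (PySem.Set.ofList (composition.map Prod.fst))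
      (fun s => s) false).Pairwise (· < ·) :=
    PySem.List.sorted_ofList_pairwise_lt _
  unfold get_formula get_formula_alt
  simp only [PySem.List.dedup_eq_ofList]
  cases hC : pvContains composition "C" with
  | false =>
    have hrc : (PySem.Set.ofList (composition.map Prod.fst)).contains "C" = false := by
      rw [Bool.eq_false_iff]
      intro hcc
      exact (Bool.false_ne_true) (hC ▸ hCiff.mpr (List.contains_iff_mem.mp hcc))
    rw [hrc, pvLoop_plain composition false _ (Or.inl rfl),
      ← selSort_eq_sorted _ hNd]
    simp only [Bool.false_eq_true, if_false, Bool.and_false, List.nil_append,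
      PySem.List.foldl_append_singleton_eq_map]
    simp [hfmt]
  | true =>
    have hCm : "C" ∈ PySem.Set.ofList (composition.map Prod.fst) := hCiff.mp hC
    have hrc : (PySem.Set.ofList (composition.map Prod.fst)).contains "C" = true :=
      List.contains_iff_mem.mpr hCm
    rw [hrc, pvLoop_hasC composition _ hNd hCm]
    simp only [if_true, Bool.and_true]
    rw [foldl_skip]
    cases hH : pvContains composition "H" with
    | false =>
      have hHm : "H" ∉ PySem.Set.ofList (composition.map Prod.fst) := by
        intro hm
        exact (Bool.false_ne_true) (hH ▸ hHiff.mpr hm)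
      have hHm2 : "H" ∉ (PySem.Set.ofList (composition.map Prod.fst)).erase "C" := by
        intro hm
        exact hHm (List.mem_of_mem_erase hm)
      rw [if_neg hHm, ← selSort_eq_sorted _ (hNd.erase "C"),
        show (PySem.Set.ofList (composition.map Prod.fst)).erase "C"
            = ((PySem.Set.ofList (composition.map Prod.fst)).erase "C").erase "H" from
          (List.erase_of_not_mem hHm2).symm,
        erase_filter_sorted _ hNd hpw]
      simp [hfmt, pvFmt]
    | true =>
      have hHm : "H" ∈ PySem.Set.ofList (composition.map Prod.fst) := hHiff.mp hH
      rw [if_pos hHm, ← selSort_eq_sorted _ ((hNd.erase "C").erase "H"),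
        erase_filter_sorted _ hNd hpw]
      simp [hfmt, pvFmt]

-- ===== VERDICT (by name: the statement is the Claim_ definition above) =====
theorem get_formula_spec : Claim_equal_get_formula := by
  intro composition _
  unfold Spec_get_formula
  exact main_eq composition
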